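-- pv_equiv track=rewrite | github.com/marchelleboid/adventofcode | 2015/day11/day11a.py | no_doubles
-- ===== SOURCE A (Python) =====
-- def no_doubles(password):
--     count = 0
--     c = 0
--     while c < len(password) - 1:
--         if password[c] == password[c + 1]:
--             if count == 1:
--                 return False
--             count = 1
--             c += 2
--         else:
--             c += 1
--
--     return True
-- ===== SOURCE B (Python) =====
-- def no_doubles(password):
--     # Run-length encode the password, then count doubles arithmetically:
--     # a run of length n contributes n // 2 non-overlapping doubles.
--     runs = []
--     for ch in password:
--         if runs and runs[-1][0] == ch:
--             c, n = runs[-1]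
--             runs[-1] = (c, n + 1)
--         else:
--             runs.append((ch, 1))
--     return sum(n // 2 for _, n in runs) < 2
-- ===== Notes on version B (the rewrite author's own statement) =====
-- stated objective: alternative
-- what changed: Replaces A's greedy pair-scan (index loop that skips 2 after a match, early-returning at the second pair) by run-length encoding the string and computing the double count arithmetically as the sum of run_length // 2 over runs.
import Mathlib
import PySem

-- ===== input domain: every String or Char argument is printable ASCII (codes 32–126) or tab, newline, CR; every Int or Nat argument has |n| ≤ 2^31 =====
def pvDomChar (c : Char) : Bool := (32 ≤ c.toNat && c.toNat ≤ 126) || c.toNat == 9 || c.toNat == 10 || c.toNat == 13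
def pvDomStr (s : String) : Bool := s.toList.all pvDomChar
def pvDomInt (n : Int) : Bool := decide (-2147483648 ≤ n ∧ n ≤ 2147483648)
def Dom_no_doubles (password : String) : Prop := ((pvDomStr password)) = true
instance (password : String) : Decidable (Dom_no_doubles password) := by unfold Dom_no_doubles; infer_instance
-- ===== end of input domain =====

-- B replaces A's greedy pair-scanning index loop by run-length encoding plus
-- arithmetic (sum of run_length / 2 over runs), an alternative algorithm of the same cost.


-- ===== PORT A =====
-- the while loop: state (count, c); fuel is only a totality device (c rises by ≥ 1
-- each iteration, so fuel = length suffices); indexing is in range, so getD is exact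
def noDoublesLoop (cs : List Char) : Nat → Int → Nat → Bool
  | 0, _, _ => true
  | fuel + 1, count, c =>
    if c < cs.length - 1 then
      if cs.getD c ' ' = cs.getD (c + 1) ' ' then
        if count = 1 then false
        else noDoublesLoop cs fuel 1 (c + 2)
      else noDoublesLoop cs fuel count (c + 1)
    else true

def no_doubles (password : String) : Bool :=
  noDoublesLoop password.toList password.toList.length 0 0

-- ===== PORT B =====
-- run-length encoding step; the runs list is kept in reverse (head = Python's runs[-1],
-- the run currently being extended), which is exactly the end Python mutates
def rleStep (runs : List (Char × Nat)) (ch : Char) : List (Char × Nat) :=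
  match runs with
  | (c, n) :: rest => if c = ch then (c, n + 1) :: rest else (ch, 1) :: (c, n) :: rest
  | [] => [(ch, 1)]

-- sum(n // 2 for _, n in runs) < 2  (sum is order-independent, so the reversal is harmless)
def no_doubles_alt (password : String) : Bool :=
  decide (((password.toList.foldl rleStep []).map (fun q => q.2 / 2)).sum < 2)

-- ===== PRECONDITION & SPEC =====
def Spec_no_doubles (password : String) (out : Bool) : Prop := out = no_doubles_alt password
instance (password : String) (out : Bool) : Decidable (Spec_no_doubles password out) := by unfold Spec_no_doubles; infer_instance

-- ===== CLAIM (what is proved, stated in full; the proofs are below) =====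
def Claim_equal_no_doubles : Prop := ∀ (password : String), Dom_no_doubles password → Spec_no_doubles password (no_doubles password)

-- ===== LEMMAS AND PROOFS =====
-- greedy non-overlapping double count: the common characterisation both ports are reduced to
def doublesCount : List Char → Nat
  | x :: y :: rest => if x = y then 1 + doublesCount rest else doublesCount (y :: rest)
  | _ => 0

def pairSum (runs : List (Char × Nat)) : Nat := (runs.map (fun q => q.2 / 2)).sum

-- doubles produced from an open run (char c, length n so far) followed by cs
def dcRun (c : Char) (n : Nat) : List Char → Nat
  | [] => n / 2
  | d :: cs => if c = d then dcRun c (n + 1) cs else n / 2 + dcRun d 1 cs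

lemma doublesCount_short (cs : List Char) (h : cs.length ≤ 1) : doublesCount cs = 0 := by
  match cs with
  | [] => rfl
  | [x] => rfl
  | x :: y :: rest => simp at h

lemma drop_two_cons (cs : List Char) (c : Nat) (h : c + 1 < cs.length) :
    cs.drop c = cs[c]'(by omega) :: cs[c + 1]'(by omega) :: cs.drop (c + 2) := by
  rw [List.drop_eq_getElem_cons (by omega), List.drop_eq_getElem_cons (by omega)]

lemma loop_eq (cs : List Char) : ∀ (fuel c : Nat) (count : Int),
    count = 0 ∨ count = 1 → cs.length - 1 - c ≤ fuel →
    noDoublesLoop cs fuel count c = decide (doublesCount (cs.drop c) + count.toNat < 2) := by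
  intro fuel
  induction fuel with
  | zero =>
    intro c count hcnt hfuel
    have hlen : (cs.drop c).length ≤ 1 := by simp [List.length_drop]; omega
    rw [noDoublesLoop, doublesCount_short _ hlen]
    symm; rw [decide_eq_true_iff]
    rcases hcnt with h | h <;> subst h <;> simp
  | succ fuel ih =>
    intro c count hcnt hfuel
    rw [noDoublesLoop]
    split
    · next h =>
      have h' : c + 1 < cs.length := by omega
      have hd := drop_two_cons cs c h'
      have e0 : cs.getD c ' ' = cs[c]'(by omega) := by
        rw [List.getD_eq_getElem?_getD, List.getElem?_eq_getElem (by omega)]; rfl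
      have e1 : cs.getD (c + 1) ' ' = cs[c + 1]'(by omega) := by
        rw [List.getD_eq_getElem?_getD, List.getElem?_eq_getElem (by omega)]; rfl
      rw [e0, e1]
      split
      · next heq =>
        have hdc : doublesCount (cs.drop c) = 1 + doublesCount (cs.drop (c + 2)) := by
          rw [hd, doublesCount, if_pos heq]
        rcases hcnt with h0 | h1
        · subst h0
          rw [if_neg (by decide)]
          rw [ih (c + 2) 1 (Or.inr rfl) (by omega)]
          rw [decide_eq_decide, hdc]
          omega
        · subst h1
          rw [if_pos rfl]
          symm
          rw [decide_eq_false_iff_not, hdc]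
          omega
      · next hne =>
        have hdc : doublesCount (cs.drop c) = doublesCount (cs.drop (c + 1)) := by
          rw [hd]
          have : cs.drop (c + 1) = cs[c + 1]'(by omega) :: cs.drop (c + 2) := by
            rw [List.drop_eq_getElem_cons (by omega)]
          rw [this, doublesCount, if_neg hne]
        rw [ih (c + 1) count hcnt (by omega), hdc]
    · next h =>
      have hlen : (cs.drop c).length ≤ 1 := by simp [List.length_drop]; omega
      rw [doublesCount_short _ hlen]
      symm; rw [decide_eq_true_iff]
      rcases hcnt with h0 | h1 <;> subst ‹_› <;> simp

lemma foldl_rle (cs : List Char) : ∀ (c : Char) (n : Nat) (rest : List (Char × Nat)),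
    pairSum (cs.foldl rleStep ((c, n) :: rest)) = pairSum rest + dcRun c n cs := by
  induction cs with
  | nil => intro c n rest; simp [pairSum, dcRun]; omega
  | cons d cs ih =>
    intro c n rest
    simp only [List.foldl_cons, rleStep]
    by_cases h : c = d
    · rw [if_pos h, ih, dcRun, if_pos h]
    · rw [if_neg h, ih, dcRun, if_neg h, pairSum]
      simp [pairSum]; omega

lemma dc_replicate : ∀ (n : Nat) (c : Char), doublesCount (List.replicate n c) = n / 2
  | 0, _ => rfl
  | 1, _ => rfl
  | n + 2, c => by
    have := dc_replicate n c
    simp [List.replicate_succ, doublesCount, this]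
    omega

lemma dc_replicate_append (d : Char) (cs : List Char) :
    ∀ (n : Nat) (c : Char), c ≠ d →
    doublesCount (List.replicate n c ++ d :: cs) = n / 2 + doublesCount (d :: cs)
  | 0, c, h => by simp
  | 1, c, h => by simp [List.replicate, doublesCount, h]
  | n + 2, c, h => by
    have := dc_replicate_append d cs n c h
    simp [List.replicate_succ, doublesCount, this]
    omega

lemma dcRun_eq (cs : List Char) : ∀ (c : Char) (n : Nat),
    dcRun c n cs = doublesCount (List.replicate n c ++ cs) := by
  induction cs with
  | nil => intro c n; simp [dcRun, dc_replicate]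
  | cons d cs ih =>
    intro c n
    by_cases h : c = d
    · subst h
      rw [dcRun, if_pos rfl, ih]
      have : List.replicate n c ++ c :: cs = List.replicate (n + 1) c ++ cs := by
        rw [List.replicate_succ']; simp
      rw [this]
    · rw [dcRun, if_neg h, dc_replicate_append d cs n c h, ih d 1]
      simp

lemma alt_eq (cs : List Char) :
    ((cs.foldl rleStep []).map (fun q => q.2 / 2)).sum = doublesCount cs := by
  cases cs with
  | nil => rfl
  | cons x cs =>
    have h1 : (x :: cs).foldl rleStep [] = cs.foldl rleStep [(x, 1)] := rfl
    have h2 := foldl_rle cs x 1 []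
    have h3 := dcRun_eq cs x 1
    simp only [pairSum] at h2
    rw [h1, h2, h3]
    simp

-- ===== VERDICT (by name: the statement is the Claim_ definition above) =====
theorem no_doubles_spec : Claim_equal_no_doubles := by
  intro password _
  unfold Spec_no_doubles no_doubles no_doubles_alt
  rw [alt_eq]
  simpa using loop_eq password.toList password.toList.length 0 0 (Or.inl rfl) (by omega)
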